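-- pv_equiv track=rewrite | github.com/jakecarlson1/community-finding | methods.py | _get_memberships
-- ===== SOURCE A (Python) =====
-- def _get_memberships(a, b):
--     i = 0
--     j = 0
--     result = []
--     while i < len(a) and j < len(b):
--         if a[i] < b[j]:
--             result.append(0)
--             i += 1
--         else:
--             result.append(1)
--             j += 1
--     if i < len(a):
--         result.extend([0] * (len(a) - i))
--     elif j < len(b):
--         result.extend([1] * (len(b) - j))
--
--     return result
-- ===== SOURCE B (Python) =====
-- def _get_memberships(a, b):
--     ra = a[::-1]
--     rb = b[::-1]
--     out = []
--     while ra and rb: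
--         if ra[-1] < rb[-1]:
--             ra.pop()
--             out.append(0)
--         else:
--             rb.pop()
--             out.append(1)
--     return out + [0] * len(ra) + [1] * len(rb)
-- ===== Notes on version B (the rewrite author's own statement) =====
-- stated objective: alternative
-- what changed: Maintains the two inputs as explicit stacks (reversed copies popped from the end) instead of A's index pointers, and emits the leftover tail as one unconditional concatenation instead of A's if/elif extend.
import Mathlib
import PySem

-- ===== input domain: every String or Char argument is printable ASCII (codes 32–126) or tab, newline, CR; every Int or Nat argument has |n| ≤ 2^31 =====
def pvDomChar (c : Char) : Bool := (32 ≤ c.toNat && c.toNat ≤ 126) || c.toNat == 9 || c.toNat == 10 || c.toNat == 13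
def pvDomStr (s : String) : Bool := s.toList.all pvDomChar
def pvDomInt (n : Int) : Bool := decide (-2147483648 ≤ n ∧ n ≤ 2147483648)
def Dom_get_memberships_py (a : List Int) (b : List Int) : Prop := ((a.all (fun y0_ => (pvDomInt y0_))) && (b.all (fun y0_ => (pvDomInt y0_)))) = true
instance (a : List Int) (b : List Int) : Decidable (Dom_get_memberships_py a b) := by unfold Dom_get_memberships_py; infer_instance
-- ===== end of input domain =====

-- B maintains the inputs as explicit stacks (reversed copies popped from the end) with an unconditional tail,
-- instead of A's index-pointer loop with a conditional extend; equal output, same cost.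
-- ===== PORT A =====
-- while i < len(a) and j < len(b): …  then extend the leftover tail; literal transliteration with Nat counters i, j
def getMembershipsLoopA (a : List Int) (b : List Int) (i j : Nat) (result : List Int) : List Int :=
  if h : i < a.length ∧ j < b.length then
    if a[i]'h.1 < b[j]'h.2 then
      getMembershipsLoopA a b (i + 1) j (result ++ [0])
    else
      getMembershipsLoopA a b i (j + 1) (result ++ [1])
  else if i < a.length then
    result ++ List.replicate (a.length - i) 0
  else if j < b.length then
    result ++ List.replicate (b.length - j) 1
  else
    result
termination_by (a.length - i) + (b.length - j)
decreasing_by all_goals omega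

def get_memberships_py (a : List Int) (b : List Int) : List Int :=
  getMembershipsLoopA a b 0 0 []

-- ===== PORT B =====
-- while ra and rb: compare ra[-1], rb[-1], pop the smaller (ties to rb); then out + [0]*len(ra) + [1]*len(rb)
def getMembershipsLoopB (ra : List Int) (rb : List Int) (out : List Int) : List Int :=
  if h : ra ≠ [] ∧ rb ≠ [] then
    if ra.getLast h.1 < rb.getLast h.2 then
      getMembershipsLoopB ra.dropLast rb (out ++ [0])
    else
      getMembershipsLoopB ra rb.dropLast (out ++ [1])
  else
    out ++ List.replicate ra.length 0 ++ List.replicate rb.length 1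
termination_by ra.length + rb.length
decreasing_by
  · have h1 : ra.dropLast.length = ra.length - 1 := List.length_dropLast
    have h2 : 0 < ra.length := List.length_pos_iff.mpr h.1
    omega
  · have h1 : rb.dropLast.length = rb.length - 1 := List.length_dropLast
    have h2 : 0 < rb.length := List.length_pos_iff.mpr h.2
    omega

def get_memberships_py_alt (a : List Int) (b : List Int) : List Int :=
  getMembershipsLoopB a.reverse b.reverse []

-- ===== PRECONDITION & SPEC =====
def Spec_get_memberships_py (a : List Int) (b : List Int) (out : List Int) : Prop := out = get_memberships_py_alt a b
instance (a : List Int) (b : List Int) (out : List Int) : Decidable (Spec_get_memberships_py a b out) := by unfold Spec_get_memberships_py; infer_instance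

-- ===== CLAIM (what is proved, stated in full; the proofs are below) =====
def Claim_equal_get_memberships_py : Prop := ∀ (a : List Int) (b : List Int), Dom_get_memberships_py a b → Spec_get_memberships_py a b (get_memberships_py a b)

-- ===== LEMMAS AND PROOFS =====
-- reference merge: both loops are shown equal to this structural recursion
def mergeSpec : List Int → List Int → List Int
  | [], b => List.replicate b.length 1
  | a, [] => List.replicate a.length 0
  | x :: a, y :: b =>
    if x < y then 0 :: mergeSpec a (y :: b)
    else 1 :: mergeSpec (x :: a) b

theorem mergeSpec_nil_right (a : List Int) :
    mergeSpec a [] = List.replicate a.length 0 := by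
  cases a <;> simp [mergeSpec]

theorem loopA_eq_merge (a b : List Int) (i j : Nat) (result : List Int) :
    getMembershipsLoopA a b i j result = result ++ mergeSpec (a.drop i) (b.drop j) := by
  induction i, j, result using getMembershipsLoopA.induct (a := a) (b := b) with
  | case1 i j result h hlt ih =>
    rw [getMembershipsLoopA]
    rw [dif_pos h, if_pos hlt, ih]
    rw [List.drop_eq_getElem_cons h.1, List.drop_eq_getElem_cons h.2,
        mergeSpec, if_pos hlt]
    simp [← List.drop_eq_getElem_cons h.2]
  | case2 i j result h hlt ih =>
    rw [getMembershipsLoopA]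
    rw [dif_pos h, if_neg hlt, ih]
    rw [List.drop_eq_getElem_cons h.1, List.drop_eq_getElem_cons h.2,
        mergeSpec, if_neg hlt]
    simp [← List.drop_eq_getElem_cons h.1]
  | case3 i j result h hi =>
    rw [getMembershipsLoopA, dif_neg h, if_pos hi]
    have hj : b.length ≤ j := by omega
    rw [List.drop_eq_nil_of_le hj, mergeSpec_nil_right, List.length_drop]
  | case4 i j result h hi hj =>
    rw [getMembershipsLoopA, dif_neg h, if_neg hi, if_pos hj]
    have hi' : a.length ≤ i := by omega
    rw [List.drop_eq_nil_of_le hi', mergeSpec, List.length_drop]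
  | case5 i j result h hi hj =>
    rw [getMembershipsLoopA, dif_neg h, if_neg hi, if_neg hj]
    have hi' : a.length ≤ i := by omega
    have hj' : b.length ≤ j := by omega
    simp [List.drop_eq_nil_of_le hi', List.drop_eq_nil_of_le hj', mergeSpec]

theorem reverse_nonempty_eq (l : List Int) (h : l ≠ []) :
    l.reverse = l.getLast h :: l.dropLast.reverse := by
  conv_lhs => rw [← List.dropLast_append_getLast h]
  simp

theorem loopB_eq_merge (ra rb : List Int) (out : List Int) :
    getMembershipsLoopB ra rb out = out ++ mergeSpec ra.reverse rb.reverse := by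
  induction ra, rb, out using getMembershipsLoopB.induct with
  | case1 ra rb out h hlt ih =>
    rw [getMembershipsLoopB, dif_pos h, if_pos hlt, ih]
    rw [reverse_nonempty_eq ra h.1, reverse_nonempty_eq rb h.2, mergeSpec, if_pos hlt]
    simp [← reverse_nonempty_eq rb h.2]
  | case2 ra rb out h hlt ih =>
    rw [getMembershipsLoopB, dif_pos h, if_neg hlt, ih]
    rw [reverse_nonempty_eq ra h.1, reverse_nonempty_eq rb h.2, mergeSpec, if_neg hlt]
    simp [← reverse_nonempty_eq ra h.1]
  | case3 ra rb out h =>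
    rw [getMembershipsLoopB, dif_neg h]
    rcases not_and_or.mp h with hra | hrb
    · have : ra = [] := by simpa using hra
      subst this
      simp [mergeSpec]
    · have : rb = [] := by simpa using hrb
      subst this
      simp [mergeSpec_nil_right]

-- ===== VERDICT (by name: the statement is the Claim_ definition above) =====
theorem get_memberships_py_spec : Claim_equal_get_memberships_py := by
  intro a b _
  unfold Spec_get_memberships_py get_memberships_py get_memberships_py_alt
  rw [loopA_eq_merge, loopB_eq_merge]
  simp
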